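-- pv_equiv track=rewrite | github.com/volcengine/veScale | test/dtensor/checkpoint/test_ragged_shard_sl.py | k_sum_distinct_sets
-- ===== SOURCE A (Python) =====
-- from typing import Set, FrozenSet
--
-- def k_sum_distinct_sets(
--     n: int,
--     k: int,
-- ) -> Set[FrozenSet[int]]:
--     if k < 0:
--         return set()
--     max_val = n
--
--     res: Set[FrozenSet[int]] = set()
--
--     def backtrack(start: int, remain: int, picks_left: int, chosen: list[int]) -> None:
--         if picks_left == 0:
--             if remain == 0:
--                 res.add(frozenset(chosen))
--             return
--         if remain < 0:
--             return
--
--         min_possible = sum(range(start, start + picks_left))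
--         if min_possible > remain:
--             return
--         hi_start = max(start, max_val - picks_left + 1)
--         max_possible = sum(range(hi_start, hi_start + picks_left))
--         if max_possible < remain:
--             return
--
--         for x in range(start, max_val + 1):
--             if x > remain:
--                 break
--             chosen.append(x)
--             backtrack(x + 1, remain - x, picks_left - 1, chosen)
--             chosen.pop()
--
--     backtrack(start=0, remain=n, picks_left=k, chosen=[])
--     return res
-- ===== SOURCE B (Python) =====
-- def k_sum_distinct_sets(n, k):
--     if k < 0:
--         return set()
--
--     res = set()
--
--     def go(slots, picks_left, remain, chosen):
--         # take/skip recursion; slots = how many candidate values are left,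
--         # the current candidate is x = n + 1 - slots
--         if picks_left == 0:
--             if remain == 0:
--                 res.add(frozenset(chosen))
--             return
--         if slots <= 0:
--             return
--         x = n + 1 - slots
--         # cheapest picks_left values from x on already exceed remain -> dead branch
--         if picks_left * (2 * x + picks_left - 1) > 2 * remain:
--             return
--         chosen.append(x)
--         go(slots - 1, picks_left - 1, remain - x, chosen)
--         chosen.pop()
--         go(slots - 1, picks_left, remain, chosen)
--
--     go(n + 1, k, n, [])
--     return res
-- ===== Notes on version B (the rewrite author's own statement) =====
-- stated objective: alternative
-- what changed: Replaces the for-loop-over-range backtracking with a binary take/skip recursion on the remaining candidate count, using a single closed-form minimum-sum prune instead of A's two sum(range(...)) window prunes and loop break.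
import Mathlib
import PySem

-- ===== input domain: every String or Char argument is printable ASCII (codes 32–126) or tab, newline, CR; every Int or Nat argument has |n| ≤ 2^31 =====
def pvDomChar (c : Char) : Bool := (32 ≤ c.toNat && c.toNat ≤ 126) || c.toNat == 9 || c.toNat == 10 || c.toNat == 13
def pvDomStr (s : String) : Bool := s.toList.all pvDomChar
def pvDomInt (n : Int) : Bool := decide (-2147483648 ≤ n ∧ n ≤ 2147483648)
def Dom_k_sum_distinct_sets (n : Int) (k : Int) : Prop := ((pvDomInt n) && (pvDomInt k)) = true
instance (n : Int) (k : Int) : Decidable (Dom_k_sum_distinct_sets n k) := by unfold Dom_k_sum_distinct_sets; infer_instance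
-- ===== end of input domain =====

-- B replaces A's for-loop-over-range backtracking by a binary take/skip recursion on each
-- candidate value with a closed-form minimum-sum prune (objective: alternative; return value only).


-- ===== PORT A =====
-- sum(range(a, b))
def pvSumRange (a b : Int) : Int := (PySem.List.pyRange a b 1).sum

-- the `for x in range(start, max_val + 1)` loop of `backtrack`, walking the range list;
-- `break` is the early return, `step` is the recursive call `backtrack(x+1, remain-x, picks_left-1, …)`
-- (passed in as a continuation so that the recursion below is structural in picks_left)
def pvLoopA (remain : Int)
    (step : Int → Int → List Int → PySem.Set (List Int) → PySem.Set (List Int))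
    (chosen : List Int) : List Int → PySem.Set (List Int) → PySem.Set (List Int)
  | [], res => res
  | x :: rest, res =>
    if x > remain then res
    else pvLoopA remain step chosen rest (step (x + 1) (remain - x) (chosen ++ [x]) res)

-- the nested function `backtrack` (res threaded as state; `chosen.append/pop` becomes
-- `chosen ++ [x]` on the recursive call; picks_left is k ≥ 0, carried as a Nat)
def pvBacktrackA (maxVal : Int) : (picksLeft : Nat) → (start remain : Int) →
    (chosen : List Int) → (res : PySem.Set (List Int)) → PySem.Set (List Int)
  | 0, _, remain, chosen, res => if remain = 0 then PySem.Set.add res chosen else res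
  | pl + 1, start, remain, chosen, res =>
    if remain < 0 then res
    else
      let minPossible := pvSumRange start (start + ((pl : Int) + 1))
      if minPossible > remain then res
      else
        let hiStart := max start (maxVal - ((pl : Int) + 1) + 1)
        let maxPossible := pvSumRange hiStart (hiStart + ((pl : Int) + 1))
        if maxPossible < remain then res
        else
          pvLoopA remain
            (fun start' remain' chosen' res' => pvBacktrackA maxVal pl start' remain' chosen' res')
            chosen (PySem.List.pyRange start (maxVal + 1) 1) res

def k_sum_distinct_sets (n : Int) (k : Int) : List (List Int) :=
  if k < 0 then PySem.Set.empty
  else pvBacktrackA n k.toNat 0 n [] PySem.Set.empty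

-- ===== PORT B =====
-- the nested function `go` of Source B: slots = number of candidate values still available
-- (the current candidate is x = n + 1 - slots); slots and picks_left are ≥ 0, carried as Nats
-- (`slots <= 0` in Source B is exactly the Nat 0 case, the top call (n+1).toNat clamps like the guard)
def pvGoB (n : Int) : (slots : Nat) → (picksLeft : Nat) → (remain : Int) →
    (chosen : List Int) → (res : PySem.Set (List Int)) → PySem.Set (List Int)
  | _, 0, remain, chosen, res => if remain = 0 then PySem.Set.add res chosen else res
  | 0, _ + 1, _, _, res => res
  | slots + 1, pl + 1, remain, chosen, res =>
    if ((pl : Int) + 1) * (2 * (n + 1 - ((slots : Int) + 1)) + ((pl : Int) + 1) - 1) > 2 * remain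
    then res
    else
      pvGoB n slots (pl + 1) remain chosen
        (pvGoB n slots pl (remain - (n + 1 - ((slots : Int) + 1)))
          (chosen ++ [n + 1 - ((slots : Int) + 1)]) res)

def k_sum_distinct_sets_alt (n : Int) (k : Int) : List (List Int) :=
  if k < 0 then PySem.Set.empty
  else pvGoB n (n + 1).toNat k.toNat n [] PySem.Set.empty

-- ===== PRECONDITION & SPEC =====
def Spec_k_sum_distinct_sets (n : Int) (k : Int) (out : List (List Int)) : Prop := out = k_sum_distinct_sets_alt n k
instance (n : Int) (k : Int) (out : List (List Int)) : Decidable (Spec_k_sum_distinct_sets n k out) := by unfold Spec_k_sum_distinct_sets; infer_instance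

-- ===== CLAIM (what is proved, stated in full; the proofs are below) =====
def Claim_equal_k_sum_distinct_sets : Prop := ∀ (n : Int) (k : Int), Dom_k_sum_distinct_sets n k → Spec_k_sum_distinct_sets n k (k_sum_distinct_sets n k)

-- ===== LEMMAS AND PROOFS =====

-- sum of the c consecutive integers a, a+1, …, a+c-1
def pvSumR (a : Int) : Nat → Int
  | 0 => 0
  | c + 1 => a + pvSumR (a + 1) c

-- the (pure) list of solutions A's enumeration emits, in emission order, no pruning
def pvSolsA (mv : Int) (start remain : Int) (pl : Nat) (chosen : List Int) : List (List Int) :=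
  match pl with
  | 0 => if remain = 0 then [chosen] else []
  | pl + 1 => (PySem.List.pyRange start (mv + 1) 1).flatMap
      (fun x => pvSolsA mv (x + 1) (remain - x) pl (chosen ++ [x]))
  termination_by pl
  decreasing_by omega

-- the (pure) list of solutions B's take/skip recursion emits, in emission order, no pruning
def pvSolsB (n : Int) : (slots : Nat) → (remain : Int) → (pl : Nat) → (chosen : List Int) →
    List (List Int)
  | _, remain, 0, chosen => if remain = 0 then [chosen] else []
  | 0, _, _ + 1, _ => []
  | slots + 1, remain, pl + 1, chosen =>
    pvSolsB n slots (remain - (n + 1 - ((slots : Int) + 1))) pl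
        (chosen ++ [n + 1 - ((slots : Int) + 1)])
      ++ pvSolsB n slots remain (pl + 1) chosen

lemma pvSumR_two_mul (c : Nat) : ∀ a : Int, 2 * pvSumR a c = c * (2 * a + c - 1) := by
  induction c with
  | zero => intro a; simp [pvSumR]
  | succ c ih =>
    intro a
    have h := ih (a + 1)
    simp only [pvSumR]
    push_cast
    push_cast at h
    linear_combination h

lemma pvSumR_mono (c : Nat) : ∀ a b : Int, a ≤ b → pvSumR a c ≤ pvSumR b c := by
  induction c with
  | zero => intro a b _; simp [pvSumR]
  | succ c ih =>
    intro a b hab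
    have := ih (a + 1) (b + 1) (by omega)
    simp only [pvSumR]
    omega

lemma pvSumR_nonneg (c : Nat) : ∀ a : Int, 0 ≤ a → 0 ≤ pvSumR a c := by
  induction c with
  | zero => intro a _; simp [pvSumR]
  | succ c ih =>
    intro a ha
    have := ih (a + 1) (by omega)
    simp only [pvSumR]
    omega

lemma pvPyRange_nil {a b : Int} (h : b ≤ a) : PySem.List.pyRange a b 1 = [] := by
  rw [List.eq_nil_iff_forall_not_mem]
  intro x hx
  have := PySem.List.mem_pyRange_one.1 hx
  omega

lemma pvSumRange_eq (c : Nat) : ∀ a : Int, pvSumRange a (a + c) = pvSumR a c := by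
  induction c with
  | zero =>
    intro a
    simp only [pvSumRange, pvSumR, Nat.cast_zero, add_zero]
    rw [pvPyRange_nil le_rfl]
    simp
  | succ c ih =>
    intro a
    simp only [pvSumRange, pvSumR] at *
    rw [PySem.List.pyRange_one_cons (by push_cast; omega)]
    rw [List.sum_cons]
    have := ih (a + 1)
    rw [show a + ((c + 1 : Nat) : Int) = a + 1 + (c : Int) by push_cast; ring]
    omega

lemma pvSolsA_shape (mv : Int) : ∀ (pl : Nat) (start remain : Int) (chosen : List Int)
    (l : List Int), l ∈ pvSolsA mv start remain pl chosen →
    ∃ s, l = chosen ++ s ∧ s.length = pl ∧ ∀ e ∈ s, start ≤ e := by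
  intro pl
  induction pl with
  | zero =>
    intro start remain chosen l hl
    rw [pvSolsA] at hl
    split at hl
    · simp at hl; exact ⟨[], by simp [hl], rfl, by simp⟩
    · simp at hl
  | succ pl ih =>
    intro start remain chosen l hl
    rw [pvSolsA] at hl
    rw [List.mem_flatMap] at hl
    obtain ⟨x, hx, hl⟩ := hl
    have hxr := PySem.List.mem_pyRange_one.1 hx
    obtain ⟨s, hs, hlen, hge⟩ := ih (x + 1) (remain - x) (chosen ++ [x]) l hl
    refine ⟨x :: s, by simp [hs], by simp [hlen], ?_⟩
    intro e he
    rcases List.mem_cons.1 he with rfl | he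
    · omega
    · have := hge e he; omega

lemma pvSolsA_min (mv : Int) : ∀ (pl : Nat) (start remain : Int) (chosen : List Int),
    pvSumR start pl > remain → pvSolsA mv start remain pl chosen = [] := by
  intro pl
  induction pl with
  | zero =>
    intro start remain chosen h
    rw [pvSolsA]
    simp only [pvSumR] at h
    split
    · omega
    · rfl
  | succ pl ih =>
    intro start remain chosen h
    rw [pvSolsA]
    rw [List.flatMap_eq_nil_iff]
    intro x hx
    have hxr := PySem.List.mem_pyRange_one.1 hx
    apply ih
    have hmono := pvSumR_mono pl (start + 1) (x + 1) (by omega)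
    simp only [pvSumR] at h
    omega

lemma pvSolsA_neg (mv : Int) (pl : Nat) (start remain : Int) (chosen : List Int)
    (hs : 0 ≤ start) (hr : remain < 0) : pvSolsA mv start remain pl chosen = [] := by
  apply pvSolsA_min
  have := pvSumR_nonneg pl start hs
  omega

lemma pvSolsA_short (mv : Int) : ∀ (pl : Nat) (start remain : Int) (chosen : List Int),
    mv + 1 < start + ((pl : Int) + 1) → pvSolsA mv start remain (pl + 1) chosen = [] := by
  intro pl
  induction pl with
  | zero =>
    intro start remain chosen h
    rw [pvSolsA]
    rw [pvPyRange_nil (by push_cast at h; omega)]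
    simp
  | succ pl ih =>
    intro start remain chosen h
    rw [pvSolsA]
    rw [List.flatMap_eq_nil_iff]
    intro x hx
    have hxr := PySem.List.mem_pyRange_one.1 hx
    apply ih
    push_cast at h ⊢
    omega

lemma pvSolsA_max (mv : Int) : ∀ (pl : Nat) (start remain : Int) (chosen : List Int),
    start + (pl : Int) ≤ mv + 1 → pvSumR (mv - pl + 1) pl < remain →
    pvSolsA mv start remain pl chosen = [] := by
  intro pl
  induction pl with
  | zero =>
    intro start remain chosen _ h
    rw [pvSolsA]
    simp only [pvSumR] at h
    split
    · omega
    · rfl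
  | succ pl ih =>
    intro start remain chosen hle h
    rw [pvSolsA]
    rw [List.flatMap_eq_nil_iff]
    intro x hx
    have hxr := PySem.List.mem_pyRange_one.1 hx
    by_cases hc : x ≤ mv - (pl : Int)
    · apply ih
      · omega
      · have hval : pvSumR (mv - (pl : Int)) (pl + 1)
            = (mv - (pl : Int)) + pvSumR (mv - (pl : Int) + 1) pl := rfl
        have hcast : mv - ((pl : Int) + 1) + 1 = mv - (pl : Int) := by ring
        push_cast at h
        rw [hcast] at h
        rw [hval] at h
        omega
    · match pl with
      | 0 => omega
      | q + 1 =>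
        apply pvSolsA_short
        push_cast at hc ⊢
        omega

lemma pvLoopA_eq (mv remain : Int) (pl : Nat) (chosen : List Int)
    (step : Int → Int → List Int → PySem.Set (List Int) → PySem.Set (List Int))
    (hstep : ∀ (start remain' : Int) (chosen' : List Int) (res : List (List Int)),
      0 ≤ start →
      (∀ l ∈ res, ¬ ∃ s, l = chosen' ++ s ∧ s.length = pl ∧ ∀ e ∈ s, start ≤ e) →
      step start remain' chosen' res = res ++ pvSolsA mv start remain' pl chosen') :
    ∀ (cnt : Nat) (a : Int) (res : List (List Int)), (mv + 1 - a).toNat ≤ cnt → 0 ≤ a →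
    (∀ l ∈ res, ¬ ∃ s, l = chosen ++ s ∧ s.length = pl + 1 ∧ ∀ e ∈ s, a ≤ e) →
    pvLoopA remain step chosen (PySem.List.pyRange a (mv + 1) 1) res
      = res ++ (PySem.List.pyRange a (mv + 1) 1).flatMap
          (fun x => pvSolsA mv (x + 1) (remain - x) pl (chosen ++ [x])) := by
  intro cnt
  induction cnt with
  | zero =>
    intro a res hcnt ha hfresh
    have hnil : PySem.List.pyRange a (mv + 1) 1 = [] := pvPyRange_nil (by omega)
    rw [hnil, pvLoopA]
    simp
  | succ cnt ih =>
    intro a res hcnt ha hfresh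
    by_cases hend : mv + 1 ≤ a
    · have hnil : PySem.List.pyRange a (mv + 1) 1 = [] := pvPyRange_nil hend
      rw [hnil, pvLoopA]
      simp
    · rw [PySem.List.pyRange_one_cons (by omega)]
      rw [pvLoopA]
      by_cases hbr : a > remain
      · rw [if_pos hbr]
        have hall : ∀ x ∈ a :: PySem.List.pyRange (a + 1) (mv + 1) 1,
            pvSolsA mv (x + 1) (remain - x) pl (chosen ++ [x]) = [] := by
          intro x hx
          have hxa : a ≤ x := by
            rcases List.mem_cons.1 hx with rfl | hx
            · exact le_rfl
            · have := PySem.List.mem_pyRange_one.1 hx; omega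
          exact pvSolsA_neg mv pl (x + 1) (remain - x) (chosen ++ [x]) (by omega) (by omega)
        rw [List.flatMap_eq_nil_iff.2 hall]
        simp
      · rw [if_neg hbr]
        have hfresh1 : ∀ l ∈ res, ¬ ∃ s, l = (chosen ++ [a]) ++ s ∧ s.length = pl
            ∧ ∀ e ∈ s, a + 1 ≤ e := by
          intro l hl ⟨s, hs, hlen, hge⟩
          exact hfresh l hl ⟨a :: s, by simp [hs], by simp [hlen],
            fun e he => by
              rcases List.mem_cons.1 he with rfl | he
              · exact le_rfl
              · have := hge e he; omega⟩
        rw [hstep (a + 1) (remain - a) (chosen ++ [a]) res (by omega) hfresh1]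
        have hfresh2 : ∀ l ∈ res ++ pvSolsA mv (a + 1) (remain - a) pl (chosen ++ [a]),
            ¬ ∃ s, l = chosen ++ s ∧ s.length = pl + 1 ∧ ∀ e ∈ s, a + 1 ≤ e := by
          intro l hl ⟨s, hs, hlen, hge⟩
          rcases List.mem_append.1 hl with hl | hl
          · exact hfresh l hl ⟨s, hs, hlen, fun e he => by have := hge e he; omega⟩
          · obtain ⟨s', hs', _, _⟩ := pvSolsA_shape mv pl (a + 1) (remain - a)
              (chosen ++ [a]) l hl
            rw [hs, List.append_assoc] at hs'
            have hseq : s = a :: s' := by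
              have := List.append_cancel_left hs'
              simpa using this
            subst hseq
            have := hge a (by simp)
            omega
        rw [ih (a + 1) (res ++ pvSolsA mv (a + 1) (remain - a) pl (chosen ++ [a]))
          (by omega) (by omega) hfresh2]
        simp [List.append_assoc]

lemma pvBacktrackA_eq (mv : Int) : ∀ (pl : Nat) (start remain : Int) (chosen : List Int)
    (res : List (List Int)), 0 ≤ start →
    (∀ l ∈ res, ¬ ∃ s, l = chosen ++ s ∧ s.length = pl ∧ ∀ e ∈ s, start ≤ e) →
    pvBacktrackA mv pl start remain chosen res = res ++ pvSolsA mv start remain pl chosen := by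
  intro pl
  induction pl with
  | zero =>
    intro start remain chosen res hs hfresh
    rw [pvBacktrackA, pvSolsA]
    by_cases hr : remain = 0
    · rw [if_pos hr, if_pos hr]
      have hmem : chosen ∉ res := by
        intro hmem
        exact hfresh chosen hmem ⟨[], by simp, rfl, by simp⟩
      simp [PySem.Set.add, hmem]
    · rw [if_neg hr, if_neg hr]
      simp
  | succ pl ih =>
    intro start remain chosen res hs hfresh
    rw [pvBacktrackA]
    by_cases h1 : remain < 0
    · rw [if_pos h1, pvSolsA_neg mv (pl + 1) start remain chosen hs h1]
      simp
    · rw [if_neg h1]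
      simp only
      by_cases h2 : pvSumRange start (start + ((pl : Int) + 1)) > remain
      · rw [if_pos h2]
        have := pvSumRange_eq (pl + 1) start
        push_cast at this
        rw [this] at h2
        rw [pvSolsA_min mv (pl + 1) start remain chosen h2]
        simp
      · rw [if_neg h2]
        by_cases h3 : pvSumRange (max start (mv - ((pl : Int) + 1) + 1))
            (max start (mv - ((pl : Int) + 1) + 1) + ((pl : Int) + 1)) < remain
        · rw [if_pos h3]
          have hsr := pvSumRange_eq (pl + 1) (max start (mv - ((pl : Int) + 1) + 1))
          push_cast at hsr
          rw [hsr] at h3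
          by_cases hc : start ≤ mv - ((pl : Int) + 1) + 1
          · rw [max_eq_right hc] at h3
            rw [pvSolsA_max mv (pl + 1) start remain chosen (by push_cast; omega) ?_]
            · simp
            · have heq : mv - ((pl : Int) + 1) + 1 = mv - ((pl + 1 : Nat) : Int) + 1 := by
                push_cast; ring
              rw [heq] at h3
              exact h3
          · rw [pvSolsA_short mv pl start remain chosen (by omega)]
            simp
        · rw [if_neg h3]
          rw [pvLoopA_eq mv remain pl chosen _
            (fun start' remain' chosen' res' h h' => ih start' remain' chosen' res' h h')
            (mv + 1 - start).toNat start res le_rfl hs hfresh]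
          conv_rhs => rw [pvSolsA]

lemma pvSolsB_shape (n : Int) : ∀ (slots : Nat) (pl : Nat) (remain : Int) (chosen : List Int)
    (l : List Int), l ∈ pvSolsB n slots remain pl chosen →
    ∃ s, l = chosen ++ s ∧ s.length = pl ∧ ∀ e ∈ s, n + 1 - (slots : Int) ≤ e := by
  intro slots
  induction slots with
  | zero =>
    intro pl remain chosen l hl
    match pl with
    | 0 =>
      rw [pvSolsB] at hl
      split at hl
      · simp at hl; exact ⟨[], by simp [hl], rfl, by simp⟩
      · simp at hl
    | pl + 1 => rw [pvSolsB] at hl; simp at hl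
  | succ slots ih =>
    intro pl remain chosen l hl
    match pl with
    | 0 =>
      rw [pvSolsB] at hl
      split at hl
      · simp at hl; exact ⟨[], by simp [hl], rfl, by simp⟩
      · simp at hl
    | pl + 1 =>
      rw [pvSolsB] at hl
      rcases List.mem_append.1 hl with hl | hl
      · obtain ⟨s, hs, hlen, hge⟩ := ih pl (remain - (n + 1 - ((slots : Int) + 1)))
          (chosen ++ [n + 1 - ((slots : Int) + 1)]) l hl
        refine ⟨(n + 1 - ((slots : Int) + 1)) :: s, by simp [hs], by simp [hlen], ?_⟩
        intro e he
        rcases List.mem_cons.1 he with rfl | he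
        · push_cast; omega
        · have := hge e he; push_cast at this ⊢; omega
      · obtain ⟨s, hs, hlen, hge⟩ := ih (pl + 1) remain chosen l hl
        exact ⟨s, hs, hlen, fun e he => by have := hge e he; push_cast at this ⊢; omega⟩

lemma pvSolsB_min (n : Int) : ∀ (slots : Nat) (pl : Nat) (remain : Int) (chosen : List Int),
    pvSumR (n + 1 - (slots : Int)) pl > remain → pvSolsB n slots remain pl chosen = [] := by
  intro slots
  induction slots with
  | zero =>
    intro pl remain chosen h
    match pl with
    | 0 =>
      rw [pvSolsB]
      simp only [pvSumR] at h
      split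
      · omega
      · rfl
    | pl + 1 => rw [pvSolsB]
  | succ slots ih =>
    intro pl remain chosen h
    match pl with
    | 0 =>
      rw [pvSolsB]
      simp only [pvSumR] at h
      split
      · omega
      · rfl
    | pl + 1 =>
      rw [pvSolsB]
      set x := n + 1 - ((slots : Int) + 1) with hxdef
      have hx : n + 1 - ((slots + 1 : Nat) : Int) = x := by push_cast; omega
      rw [hx] at h
      have hxs : n + 1 - ((slots : Nat) : Int) = x + 1 := by omega
      rw [ih pl (remain - x) (chosen ++ [x]) (by rw [hxs]; simp only [pvSumR] at h; omega)]
      rw [ih (pl + 1) remain chosen ?_]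
      · simp
      · rw [hxs]
        have hmono := pvSumR_mono pl (x + 1) (x + 1 + 1) (by omega)
        simp only [pvSumR] at h ⊢
        omega

lemma pvSolsB_eq_pvSolsA (n : Int) : ∀ (slots : Nat) (pl : Nat) (remain : Int)
    (chosen : List Int), pvSolsB n slots remain pl chosen
      = pvSolsA n (n + 1 - (slots : Int)) remain pl chosen := by
  intro slots
  induction slots with
  | zero =>
    intro pl remain chosen
    match pl with
    | 0 => rw [pvSolsB, pvSolsA]
    | pl + 1 =>
      rw [pvSolsB, pvSolsA]
      rw [pvPyRange_nil (by push_cast; omega)]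
      simp
  | succ slots ih =>
    intro pl remain chosen
    match pl with
    | 0 => rw [pvSolsB, pvSolsA]
    | pl + 1 =>
      rw [pvSolsB, pvSolsA]
      set x := n + 1 - ((slots + 1 : Nat) : Int) with hxdef
      have hxlt : x < n + 1 := by rw [hxdef]; push_cast; omega
      rw [PySem.List.pyRange_one_cons hxlt]
      rw [List.flatMap_cons]
      have hxs : n + 1 - ((slots : Nat) : Int) = x + 1 := by rw [hxdef]; push_cast; omega
      have h1 := ih pl (remain - x) (chosen ++ [x])
      rw [hxs] at h1
      have h2 := ih (pl + 1) remain chosen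
      rw [hxs] at h2
      have hxx : n + 1 - ((slots : Int) + 1) = x := by rw [hxdef]; push_cast; omega
      rw [hxx, h1, h2]
      congr 1
      rw [pvSolsA]

lemma pvGoB_eq (n : Int) : ∀ (slots : Nat) (pl : Nat) (remain : Int) (chosen : List Int)
    (res : List (List Int)),
    (∀ l ∈ res, ¬ ∃ s, l = chosen ++ s ∧ s.length = pl ∧ ∀ e ∈ s, n + 1 - (slots : Int) ≤ e) →
    pvGoB n slots pl remain chosen res = res ++ pvSolsB n slots remain pl chosen := by
  intro slots
  induction slots with
  | zero =>
    intro pl remain chosen res hfresh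
    match pl with
    | 0 =>
      rw [pvGoB, pvSolsB]
      by_cases hr : remain = 0
      · rw [if_pos hr, if_pos hr]
        have hmem : chosen ∉ res := fun hmem =>
          hfresh chosen hmem ⟨[], by simp, rfl, by simp⟩
        simp [PySem.Set.add, hmem]
      · rw [if_neg hr, if_neg hr]; simp
    | pl + 1 => rw [pvGoB, pvSolsB]; simp
  | succ slots ih =>
    intro pl remain chosen res hfresh
    match pl with
    | 0 =>
      rw [pvGoB, pvSolsB]
      by_cases hr : remain = 0
      · rw [if_pos hr, if_pos hr]
        have hmem : chosen ∉ res := fun hmem =>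
          hfresh chosen hmem ⟨[], by simp, rfl, by simp⟩
        simp [PySem.Set.add, hmem]
      · rw [if_neg hr, if_neg hr]; simp
    | pl + 1 =>
      rw [pvGoB]
      set x := n + 1 - ((slots : Int) + 1) with hxdef
      have hxs : n + 1 - ((slots : Nat) : Int) = x + 1 := by rw [hxdef]; omega
      have hxss : n + 1 - ((slots + 1 : Nat) : Int) = x := by rw [hxdef]; push_cast; omega
      by_cases h2 : ((pl : Int) + 1) * (2 * x + ((pl : Int) + 1) - 1) > 2 * remain
      · rw [if_pos h2]
        have h2m := pvSumR_two_mul (pl + 1) x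
        push_cast at h2m
        rw [pvSolsB_min n (slots + 1) (pl + 1) remain chosen (by rw [hxss]; omega)]
        simp
      · rw [if_neg h2]
        have hfresh1 : ∀ l ∈ res, ¬ ∃ s, l = (chosen ++ [x]) ++ s ∧ s.length = pl
            ∧ ∀ e ∈ s, n + 1 - (slots : Int) ≤ e := by
          intro l hl ⟨s, hs, hlen, hge⟩
          refine hfresh l hl ⟨x :: s, by simp [hs], by simp [hlen], ?_⟩
          intro e he
          rcases List.mem_cons.1 he with rfl | he
          · rw [hxss]
          · have := hge e he; rw [hxss]; rw [hxs] at this; omega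
        rw [ih pl (remain - x) (chosen ++ [x]) res hfresh1]
        have hfresh2 : ∀ l ∈ res ++ pvSolsB n slots (remain - x) pl (chosen ++ [x]),
            ¬ ∃ s, l = chosen ++ s ∧ s.length = pl + 1 ∧ ∀ e ∈ s, n + 1 - (slots : Int) ≤ e := by
          intro l hl ⟨s, hs, hlen, hge⟩
          rcases List.mem_append.1 hl with hl | hl
          · refine hfresh l hl ⟨s, hs, hlen, ?_⟩
            intro e he
            have := hge e he
            rw [hxss]; rw [hxs] at this; omega
          · obtain ⟨s', hs', _, _⟩ := pvSolsB_shape n slots pl (remain - x)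
              (chosen ++ [x]) l hl
            rw [hs, List.append_assoc] at hs'
            have hseq : s = x :: s' := by
              have := List.append_cancel_left hs'
              simpa using this
            subst hseq
            have := hge x (by simp)
            rw [hxs] at this
            omega
        rw [ih (pl + 1) remain chosen
          (res ++ pvSolsB n slots (remain - x) pl (chosen ++ [x])) hfresh2]
        conv_rhs => rw [pvSolsB]
        rw [← hxdef]
        simp [List.append_assoc]

-- start value is irrelevant when the candidate range is empty (n + 1 ≤ start): both sides are empty
lemma pvSolsA_start_irrel (n : Int) (pl : Nat) (remain : Int) (chosen : List Int)
    (s t : Int) (hs : n + 1 ≤ s) (ht : n + 1 ≤ t) :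
    pvSolsA n s remain pl chosen = pvSolsA n t remain pl chosen := by
  match pl with
  | 0 => rw [pvSolsA]; conv_rhs => rw [pvSolsA]
  | pl + 1 =>
    rw [pvSolsA]; conv_rhs => rw [pvSolsA]
    rw [pvPyRange_nil hs, pvPyRange_nil ht]

-- ===== VERDICT (by name: the statement is the Claim_ definition above) =====
theorem k_sum_distinct_sets_spec : Claim_equal_k_sum_distinct_sets := by
  unfold Claim_equal_k_sum_distinct_sets
  intro n k _
  unfold Spec_k_sum_distinct_sets k_sum_distinct_sets k_sum_distinct_sets_alt
  by_cases hk : k < 0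
  · rw [if_pos hk, if_pos hk]
  · rw [if_neg hk, if_neg hk]
    rw [pvBacktrackA_eq n k.toNat 0 n [] PySem.Set.empty le_rfl
      (by simp [PySem.Set.empty])]
    rw [pvGoB_eq n (n + 1).toNat k.toNat n [] PySem.Set.empty
      (by simp [PySem.Set.empty])]
    rw [pvSolsB_eq_pvSolsA n (n + 1).toNat k.toNat n []]
    by_cases hn : 0 ≤ n + 1
    · rw [show n + 1 - (((n + 1).toNat : Nat) : Int) = 0 by omega]
    · rw [pvSolsA_start_irrel n k.toNat n [] (n + 1 - ((n + 1).toNat : Int)) 0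
        (by omega) (by omega)]
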